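-- pv_equiv track=rewrite | github.com/vassagras/AoC_2024 | day_19.py | check_for_matching_towels_v2
-- ===== SOURCE A (Python) =====
-- def check_for_matching_towels_v2(cur_design, patterns, pattern_cache):
--     # all letters of the design have been matched with one or multiple towels
--     if len(cur_design) == 0:
--         return 1
--
--     # if the current design (full or sub-design) has already been assessed, there is not need to do it again
--     if cur_design in pattern_cache:
--         return pattern_cache[cur_design]
--
--     match_count = 0
--     for towel in patterns:
--         if cur_design.startswith(towel):
--             if check_for_matching_towels_v2(cur_design[len(towel):], patterns, pattern_cache) > 0:
--                 match_count += check_for_matching_towels_v2(cur_design[len(towel):], patterns, pattern_cache)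
--     pattern_cache[cur_design] = match_count
--     return match_count
-- ===== SOURCE B (Python) =====
-- def check_for_matching_towels_v2(cur_design, patterns, pattern_cache):
--     # Bottom-up table over suffix positions instead of memoized recursion.
--     # Note: return-value equivalent to the recursive version; it mutates
--     # pattern_cache only with the entry for cur_design itself, not with
--     # every visited sub-suffix.
--     if len(cur_design) == 0:
--         return 1
--     if cur_design in pattern_cache:
--         return pattern_cache[cur_design]
--     n = len(cur_design)
--     dp = [0] * (n + 1)
--     dp[n] = 1
--     for i in range(n - 1, -1, -1):
--         suffix = cur_design[i:]
--         if suffix in pattern_cache: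
--             dp[i] = pattern_cache[suffix]
--         else:
--             dp[i] = sum(dp[i + len(t)] for t in patterns
--                         if cur_design.startswith(t, i) and dp[i + len(t)] > 0)
--     pattern_cache[cur_design] = dp[0]
--     return dp[0]
-- ===== Notes on version B (the rewrite author's own statement) =====
-- stated objective: alternative
-- what changed: Replaces the memoized top-down recursion (which calls itself twice per matching towel and threads a mutable cache) by an iterative bottom-up table over suffix positions, consulting the given cache as a read-only override per suffix; equivalence is about the return value (B writes only the cur_design entry into the cache, not every visited suffix).
import Mathlib
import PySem

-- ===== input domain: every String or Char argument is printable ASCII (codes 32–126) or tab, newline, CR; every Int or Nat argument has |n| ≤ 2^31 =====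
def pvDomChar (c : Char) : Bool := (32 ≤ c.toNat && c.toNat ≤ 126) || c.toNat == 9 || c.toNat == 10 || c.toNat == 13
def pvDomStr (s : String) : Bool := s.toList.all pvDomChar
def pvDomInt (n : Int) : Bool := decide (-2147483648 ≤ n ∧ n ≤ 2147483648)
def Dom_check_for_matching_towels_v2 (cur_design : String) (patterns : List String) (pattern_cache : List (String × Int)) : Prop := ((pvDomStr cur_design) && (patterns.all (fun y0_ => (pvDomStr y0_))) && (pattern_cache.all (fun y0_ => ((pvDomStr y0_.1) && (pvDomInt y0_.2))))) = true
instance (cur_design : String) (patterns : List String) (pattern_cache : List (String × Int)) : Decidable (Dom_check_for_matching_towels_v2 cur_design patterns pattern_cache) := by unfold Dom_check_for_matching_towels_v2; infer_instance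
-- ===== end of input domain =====

-- B replaces A's memoized top-down recursion by an iterative bottom-up table over suffix
-- positions; the equivalence proved is about the RETURN value only (A fills pattern_cache
-- with every visited suffix, B writes only the cur_design entry).

-- ===== PORT A =====
-- A's recursion terminates (under Pre_) only because every matching towel is nonempty, so the
-- design shrinks strictly: fuel = len(cur_design) + 1 is exact there.  The state (value, cache)
-- is threaded exactly as Python mutates the dict; cur_design[len(towel):] is List.drop since
-- len(towel) ≥ 0.  The loop over patterns is pvALoop (one step per towel, same branch order,
-- including the SECOND recursive call Python makes when the first returned > 0).
mutual
def pvAGo (fuel : Nat) (s : List Char) (allpats : List (List Char))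
    (cache : PySem.Dict (List Char) Int) : Int × PySem.Dict (List Char) Int :=
  match fuel with
  | 0 => (0, cache)  -- fuel exhaustion: unreachable under Pre_
  | fuel + 1 =>
    if s.length = 0 then (1, cache)
    else
      match cache.get? s with
      | some v => (v, cache)
      | none =>
        let res := pvALoop fuel s allpats allpats 0 cache
        (res.1, res.2.insert s res.1)
termination_by (fuel, 0)

def pvALoop (fuel : Nat) (s : List Char) (allpats pats : List (List Char))
    (mc : Int) (cache : PySem.Dict (List Char) Int) : Int × PySem.Dict (List Char) Int :=
  match pats with
  | [] => (mc, cache)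
  | t :: rest =>
    if PySem.Chars.startswith s t then
      let r1 := pvAGo fuel (s.drop t.length) allpats cache
      if 0 < r1.1 then
        let r2 := pvAGo fuel (s.drop t.length) allpats r1.2
        pvALoop fuel s allpats rest (mc + r2.1) r2.2
      else
        pvALoop fuel s allpats rest mc r1.2
    else pvALoop fuel s allpats rest mc cache
termination_by (fuel, pats.length + 1)
end

def check_for_matching_towels_v2 (cur_design : String) (patterns : List String) (pattern_cache : List (String × Int)) : Int :=
  (pvAGo (cur_design.toList.length + 1) cur_design.toList (patterns.map String.toList)
    (PySem.Dict.mk (pattern_cache.map (fun p => (p.1.toList, p.2))))).1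

-- ===== PORT B =====
-- one loop step of B: prepend dp[i] (for the suffix starting at i) to the already computed
-- dp[i+1..n]; '0 :: tail' is the dp array at the moment the comprehension runs (dp[i] still 0),
-- so dp[i+len(t)] is (0 :: tail).getD t.length 0; cur_design.startswith(t, i) is startswith of
-- the suffix s.drop i.
def pvBStep (s : List Char) (pats : List (List Char)) (cache : PySem.Dict (List Char) Int)
    (i : Nat) (tail : List Int) : List Int :=
  let suf := s.drop i
  let v : Int :=
    match cache.get? suf with
    | some v => v
    | none =>
      pats.foldl (fun acc t =>
        if PySem.Chars.startswith suf t then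
          let r := (0 :: tail).getD t.length 0
          if 0 < r then acc + r else acc
        else acc) 0
  v :: tail

-- dp entries for positions n-m .. n (B's loop i = n-1 downto 0, here run m times)
def pvBFrom (s : List Char) (pats : List (List Char)) (cache : PySem.Dict (List Char) Int) : Nat → List Int
  | 0 => [1]
  | m + 1 => pvBStep s pats cache (s.length - (m + 1)) (pvBFrom s pats cache m)

def check_for_matching_towels_v2_alt (cur_design : String) (patterns : List String) (pattern_cache : List (String × Int)) : Int :=
  let s := cur_design.toList
  let cache := PySem.Dict.mk (pattern_cache.map (fun p => (p.1.toList, p.2)))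
  if s.length = 0 then 1
  else
    match cache.get? s with
    | some v => v
    | none => (pvBFrom s (patterns.map String.toList) cache s.length).headD 0

-- ===== PRECONDITION & SPEC =====
-- Pre_ excludes exactly the inputs where Python A raises (RecursionError): an empty string among
-- the patterns with a nonempty design not already in the cache makes A recurse on the unchanged
-- design forever.  A returns normally on every other input.
def Pre_check_for_matching_towels_v2 (cur_design : String) (patterns : List String) (pattern_cache : List (String × Int)) : Prop :=
  ("" ∉ patterns) ∨ cur_design = "" ∨ cur_design ∈ pattern_cache.map Prod.fst
instance (cur_design : String) (patterns : List String) (pattern_cache : List (String × Int)) : Decidable (Pre_check_for_matching_towels_v2 cur_design patterns pattern_cache) := by unfold Pre_check_for_matching_towels_v2; infer_instance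

def pvWitness_check_for_matching_towels_v2 : String × List String × (List (String × Int)) := ("abab", (["a", "b", "ab"], [("c", 3)]))

def Spec_check_for_matching_towels_v2 (cur_design : String) (patterns : List String) (pattern_cache : List (String × Int)) (out : Int) : Prop := out = check_for_matching_towels_v2_alt cur_design patterns pattern_cache
instance (cur_design : String) (patterns : List String) (pattern_cache : List (String × Int)) (out : Int) : Decidable (Spec_check_for_matching_towels_v2 cur_design patterns pattern_cache out) := by unfold Spec_check_for_matching_towels_v2; infer_instance

-- ===== CLAIM (what is proved, stated in full; the proofs are below) =====
def Claim_equal_check_for_matching_towels_v2 : Prop := ∀ (cur_design : String) (patterns : List String) (pattern_cache : List (String × Int)), Dom_check_for_matching_towels_v2 cur_design patterns pattern_cache → Pre_check_for_matching_towels_v2 cur_design patterns pattern_cache → Spec_check_for_matching_towels_v2 cur_design patterns pattern_cache (check_for_matching_towels_v2 cur_design patterns pattern_cache)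
-- ===== LEMMAS AND PROOFS =====

-- dp value at position j (j ≤ n), read off B's table
def pvD (s : List Char) (pats : List (List Char)) (c0 : PySem.Dict (List Char) Int) (j : Nat) : Int :=
  (pvBFrom s pats c0 (s.length - j)).headD 0

-- the sum A's towel loop accumulates at position j, expressed with pvD
def pvF (s : List Char) (pats : List (List Char)) (c0 : PySem.Dict (List Char) Int) (j : Nat) : List (List Char) → Int
  | [] => 0
  | t :: r => (if PySem.Chars.startswith (s.drop j) t ∧ 0 < pvD s pats c0 (j + t.length) then pvD s pats c0 (j + t.length) else 0) + pvF s pats c0 j r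

-- every cached value at a suffix key agrees with the dp value there
def pvGood (s : List Char) (pats : List (List Char)) (c0 c : PySem.Dict (List Char) Int) : Prop :=
  ∀ j : Nat, j < s.length → ∀ v : Int, c.get? (s.drop j) = some v → v = pvD s pats c0 j

def pvExt (c0 c : PySem.Dict (List Char) Int) : Prop :=
  ∀ (k : List Char) (v : Int), c0.get? k = some v → c.get? k = some v

theorem pvBFrom_getD (s : List Char) (pats : List (List Char)) (c : PySem.Dict (List Char) Int) :
    ∀ m k : Nat, m ≤ s.length → k ≤ m →
      (pvBFrom s pats c m).getD k 0 = pvD s pats c (s.length - m + k) := by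
  intro m
  induction m with
  | zero =>
    intro k _ hk
    interval_cases k
    simp [pvBFrom, pvD]
  | succ m ih =>
    intro k hm hk
    match k with
    | 0 =>
      show (pvBFrom s pats c (m+1)).getD 0 0 = pvD s pats c (s.length - (m+1))
      have h1 : s.length - (s.length - (m+1)) = m + 1 := by omega
      simp only [pvD, h1]
      simp [pvBFrom, pvBStep]
    | k + 1 =>
      have : (pvBFrom s pats c (m+1)).getD (k+1) 0 = (pvBFrom s pats c m).getD k 0 := by
        simp [pvBFrom, pvBStep]
      rw [this, ih k (by omega) (by omega)]
      congr 1
      omega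

theorem pvD_base (s : List Char) (pats : List (List Char)) (c : PySem.Dict (List Char) Int) (j : Nat)
    (h : s.length ≤ j) : pvD s pats c j = 1 := by
  have : s.length - j = 0 := by omega
  simp [pvD, this, pvBFrom]

theorem pvD_unfold (s : List Char) (pats : List (List Char)) (c : PySem.Dict (List Char) Int) (j : Nat)
    (h : j < s.length) :
    pvD s pats c j =
      (match c.get? (s.drop j) with
       | some v => v
       | none =>
         pats.foldl (fun acc t =>
           if PySem.Chars.startswith (s.drop j) t then
             let r := (0 :: pvBFrom s pats c (s.length - j - 1)).getD t.length 0
             if 0 < r then acc + r else acc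
           else acc) 0) := by
  have h1 : s.length - j = (s.length - j - 1) + 1 := by omega
  have h2 : s.length - ((s.length - j - 1) + 1) = j := by omega
  conv_lhs => rw [pvD, h1]
  rw [pvBFrom, h2]
  cases hc : PySem.Dict.get? c (s.drop j) <;> simp [pvBStep, hc]

theorem pvD_hit (s : List Char) (pats : List (List Char)) (c : PySem.Dict (List Char) Int) (j : Nat) (v : Int)
    (h : j < s.length) (hc : c.get? (s.drop j) = some v) : pvD s pats c j = v := by
  rw [pvD_unfold s pats c j h, hc]

theorem pvF_foldl (s : List Char) (pats : List (List Char)) (c : PySem.Dict (List Char) Int) (j : Nat)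
    (h : j < s.length) :
    ∀ (ps : List (List Char)), (∀ t ∈ ps, t ≠ []) → ∀ acc : Int,
      ps.foldl (fun acc t =>
          if PySem.Chars.startswith (s.drop j) t then
            let r := (0 :: pvBFrom s pats c (s.length - j - 1)).getD t.length 0
            if 0 < r then acc + r else acc
          else acc) acc = acc + pvF s pats c j ps := by
  intro ps
  induction ps with
  | nil => intro _ acc; simp [pvF]
  | cons t rest ih =>
    intro hne acc
    have hrest : ∀ u ∈ rest, u ≠ [] := fun u hu => hne u (List.mem_cons_of_mem _ hu)
    by_cases hsw : PySem.Chars.startswith (s.drop j) t = true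
    · have htne : t ≠ [] := hne t List.mem_cons_self
      have hlen1 : 1 ≤ t.length := by
        cases t with
        | nil => exact absurd rfl htne
        | cons a l => simp
      have hpre : t.length ≤ s.length - j := by
        have := (List.isPrefixOf_iff_prefix.mp hsw).length_le
        simpa using this
      have hget : (0 :: pvBFrom s pats c (s.length - j - 1)).getD t.length 0 = pvD s pats c (j + t.length) := by
        have h0 : (0 :: pvBFrom s pats c (s.length - j - 1)).getD t.length 0
            = (pvBFrom s pats c (s.length - j - 1)).getD (t.length - 1) 0 := by
          match t, htne with
          | a :: l, _ => simp
        rw [h0, pvBFrom_getD s pats c (s.length - j - 1) (t.length - 1) (by omega) (by omega)]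
        congr 1
        omega
      simp only [List.foldl_cons, hsw, if_true, hget]
      by_cases hpos : 0 < pvD s pats c (j + t.length)
      · simp only [hpos, if_true]
        rw [ih hrest]
        simp [pvF, hsw, hpos]
        ring
      · simp only [hpos, if_false]
        rw [ih hrest]
        simp [pvF, hsw, hpos]
    · simp only [List.foldl_cons, hsw]
      rw [ih hrest]
      simp [pvF, hsw]

theorem pvD_miss (s : List Char) (pats : List (List Char)) (c : PySem.Dict (List Char) Int) (j : Nat)
    (h : j < s.length) (hc : c.get? (s.drop j) = none) (hps : ∀ t ∈ pats, t ≠ []) :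
    pvD s pats c j = pvF s pats c j pats := by
  rw [pvD_unfold s pats c j h, hc]
  simpa using pvF_foldl s pats c j h pats hps 0

-- A's towel loop: accumulates exactly pvF and preserves the cache invariants
theorem pvALoop_spec (s : List Char) (pats : List (List Char)) (c0 : PySem.Dict (List Char) Int)
    (f : Nat) (j : Nat) (hj : j < s.length) (hf : s.length - j ≤ f)
    (IH : ∀ (j' : Nat) (c : PySem.Dict (List Char) Int), j' ≤ s.length → s.length - j' < f →
      pvGood s pats c0 c → pvExt c0 c →
      (pvAGo f (s.drop j') pats c).1 = pvD s pats c0 j' ∧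
      pvGood s pats c0 (pvAGo f (s.drop j') pats c).2 ∧ pvExt c0 (pvAGo f (s.drop j') pats c).2) :
    ∀ (ps : List (List Char)), (∀ t ∈ ps, t ≠ []) → ∀ (mc : Int) (c : PySem.Dict (List Char) Int),
      pvGood s pats c0 c → pvExt c0 c →
      (pvALoop f (s.drop j) pats ps mc c).1 = mc + pvF s pats c0 j ps ∧
      pvGood s pats c0 (pvALoop f (s.drop j) pats ps mc c).2 ∧
      pvExt c0 (pvALoop f (s.drop j) pats ps mc c).2 := by
  intro ps
  induction ps with
  | nil => intro _ mc c hg he; simp [pvALoop, pvF, hg, he]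
  | cons t rest ih =>
    intro hne mc c hg he
    have hrest : ∀ u ∈ rest, u ≠ [] := fun u hu => hne u (List.mem_cons_of_mem _ hu)
    have htne : t ≠ [] := hne t List.mem_cons_self
    by_cases hsw : PySem.Chars.startswith (s.drop j) t = true
    · have hlen1 : 1 ≤ t.length := by
        cases t with
        | nil => exact absurd rfl htne
        | cons a l => simp
      have hpre : t.length ≤ s.length - j := by
        have := (List.isPrefixOf_iff_prefix.mp hsw).length_le
        simpa using this
      have hdd : (s.drop j).drop t.length = s.drop (j + t.length) := by
        rw [List.drop_drop]
      have h1 := IH (j + t.length) c (by omega) (by omega) hg he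
      by_cases hpos : 0 < pvD s pats c0 (j + t.length)
      · have hr1 : 0 < (pvAGo f (s.drop (j + t.length)) pats c).1 := by rw [h1.1]; exact hpos
        have h2 := IH (j + t.length) (pvAGo f (s.drop (j + t.length)) pats c).2 (by omega) (by omega) h1.2.1 h1.2.2
        have h3 := ih hrest (mc + (pvAGo f (s.drop (j + t.length)) pats (pvAGo f (s.drop (j + t.length)) pats c).2).1)
          (pvAGo f (s.drop (j + t.length)) pats (pvAGo f (s.drop (j + t.length)) pats c).2).2 h2.2.1 h2.2.2
        have hstep : pvALoop f (s.drop j) pats (t :: rest) mc c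
            = pvALoop f (s.drop j) pats rest
                (mc + (pvAGo f (s.drop (j + t.length)) pats (pvAGo f (s.drop (j + t.length)) pats c).2).1)
                (pvAGo f (s.drop (j + t.length)) pats (pvAGo f (s.drop (j + t.length)) pats c).2).2 := by
          rw [pvALoop]
          simp only [hsw, if_true]
          rw [hdd, if_pos hr1]
        rw [hstep]
        refine ⟨?_, h3.2.1, h3.2.2⟩
        rw [h3.1, h2.1]
        simp [pvF, hsw, hpos]
        ring
      · have hr1 : ¬ 0 < (pvAGo f (s.drop (j + t.length)) pats c).1 := by rw [h1.1]; exact hpos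
        have h3 := ih hrest mc (pvAGo f (s.drop (j + t.length)) pats c).2 h1.2.1 h1.2.2
        have hstep : pvALoop f (s.drop j) pats (t :: rest) mc c
            = pvALoop f (s.drop j) pats rest mc (pvAGo f (s.drop (j + t.length)) pats c).2 := by
          rw [pvALoop]
          simp only [hsw, if_true]
          rw [hdd, if_neg hr1]
        rw [hstep]
        refine ⟨?_, h3.2.1, h3.2.2⟩
        rw [h3.1]
        simp [pvF, hsw, hpos]
    · have hstep : pvALoop f (s.drop j) pats (t :: rest) mc c = pvALoop f (s.drop j) pats rest mc c := by
        rw [pvALoop]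
        simp [hsw]
      rw [hstep]
      have h3 := ih hrest mc c hg he
      refine ⟨?_, h3.2.1, h3.2.2⟩
      rw [h3.1]
      simp [pvF, hsw]

-- main invariant: A's recursion computes the dp value and keeps the cache consistent
theorem pvAGo_spec (s : List Char) (pats : List (List Char)) (c0 : PySem.Dict (List Char) Int)
    (hps : ∀ t ∈ pats, t ≠ []) :
    ∀ (f : Nat) (j : Nat) (c : PySem.Dict (List Char) Int), j ≤ s.length → s.length - j < f →
      pvGood s pats c0 c → pvExt c0 c →
      (pvAGo f (s.drop j) pats c).1 = pvD s pats c0 j ∧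
      pvGood s pats c0 (pvAGo f (s.drop j) pats c).2 ∧ pvExt c0 (pvAGo f (s.drop j) pats c).2 := by
  intro f
  induction f with
  | zero => intro j c _ hf; omega
  | succ f ihf =>
    intro j c hj hf hg he
    by_cases hempty : (s.drop j).length = 0
    · have hjn : j = s.length := by
        have := List.length_drop (l := s) (i := j)
        omega
      have : pvAGo (f+1) (s.drop j) pats c = (1, c) := by
        rw [pvAGo]
        simp [hempty]
      rw [this]
      exact ⟨by rw [pvD_base s pats c0 j (by omega)], hg, he⟩
    · have hjlt : j < s.length := by
        have := List.length_drop (l := s) (i := j)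
        omega
      have hne0 : ¬ (s.length - j = 0) := by omega
      cases hc : c.get? (s.drop j) with
      | some v =>
        have : pvAGo (f+1) (s.drop j) pats c = (v, c) := by
          rw [pvAGo]
          simp [hne0, hc]
        rw [this]
        exact ⟨hg j hjlt v hc, hg, he⟩
      | none =>
        have hc0 : c0.get? (s.drop j) = none := by
          cases hc0 : c0.get? (s.drop j) with
          | none => rfl
          | some w => rw [he _ _ hc0] at hc; exact absurd hc (by simp)
        have hloop := pvALoop_spec s pats c0 f j hjlt (by omega)
          (fun j' c' hj' hf' hg' he' => ihf j' c' hj' hf' hg' he') pats hps 0 c hg he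
        have hmc : (pvALoop f (s.drop j) pats pats 0 c).1 = pvD s pats c0 j := by
          rw [hloop.1, pvD_miss s pats c0 j hjlt hc0 hps]; ring
        have hstep : pvAGo (f+1) (s.drop j) pats c
            = ((pvALoop f (s.drop j) pats pats 0 c).1,
               (pvALoop f (s.drop j) pats pats 0 c).2.insert (s.drop j) (pvALoop f (s.drop j) pats pats 0 c).1) := by
          rw [pvAGo]
          simp [hne0, hc]
        rw [hstep]
        refine ⟨hmc, ?_, ?_⟩
        · intro j' hj' v hv
          rw [PySem.Dict.get?_insert] at hv
          by_cases heq : s.drop j' = s.drop j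
          · have : j' = j := by
              have h1 := List.length_drop (l := s) (i := j')
              have h2 := List.length_drop (l := s) (i := j)
              have := congrArg List.length heq
              omega
            rw [if_pos heq] at hv
            cases hv
            rw [this, hmc]
          · rw [if_neg heq] at hv
            exact hloop.2.1 j' hj' v hv
        · intro k v hk
          rw [PySem.Dict.get?_insert]
          by_cases heq : k = s.drop j
          · exfalso
            rw [heq] at hk
            rw [he _ _ hk] at hc
            exact absurd hc (by simp)
          · rw [if_neg heq]
            exact hloop.2.2 k v hk

-- a pattern string is "" iff its char list is []
theorem pv_toList_nil (p : String) : p.toList = [] ↔ p = "" := by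
  constructor
  · intro h
    have := congrArg String.ofList h
    simpa using this
  · intro h; simp [h]

-- ===== VERDICT (by name: the statement is the Claim_ definition above) =====
theorem check_for_matching_towels_v2_spec : Claim_equal_check_for_matching_towels_v2 := by
  intro cur_design patterns pattern_cache _ hpre
  unfold Spec_check_for_matching_towels_v2
  unfold check_for_matching_towels_v2 check_for_matching_towels_v2_alt
  set s := cur_design.toList with hs
  set pats := patterns.map String.toList with hpats
  set c0 := PySem.Dict.mk (pattern_cache.map (fun p => (p.1.toList, p.2))) with hc0
  by_cases hempty : s.length = 0
  · rw [pvAGo]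
    simp [hempty]
  · simp only [if_neg hempty]
    cases hc : c0.get? s with
    | some v =>
      rw [pvAGo]
      simp [hempty, hc]
    | none =>
      -- Pre_ forces "" ∉ patterns here: the design is nonempty and the cache lookup missed
      have hne : cur_design ≠ "" := by
        intro h
        rw [h] at hs
        simp [hs] at hempty
      have hmem : cur_design ∉ pattern_cache.map Prod.fst := by
        intro hmem
        rcases List.mem_map.mp hmem with ⟨p, hp, hpk⟩
        have hsome : (c0.get? s).isSome := by
          rw [hc0, hs]
          simp only [PySem.Dict.get?, Option.isSome_map]
          rw [List.find?_isSome]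
          exact ⟨(p.1.toList, p.2), List.mem_map.mpr ⟨p, hp, rfl⟩, by simp [hpk]⟩
        rw [hc] at hsome
        exact absurd hsome (by simp)
      have hnopat : "" ∉ patterns := by
        rcases hpre with h | h | h
        · exact h
        · exact absurd h hne
        · exact absurd h hmem
      have hps : ∀ t ∈ pats, t ≠ [] := by
        intro t ht
        rcases List.mem_map.mp ht with ⟨p, hp, rfl⟩
        intro hnil
        exact hnopat ((pv_toList_nil p).mp hnil ▸ hp)
      have hmain := pvAGo_spec s pats c0 hps (s.length + 1) 0 c0 (by omega) (by omega)
        (fun j hj v hv => (pvD_hit s pats c0 j v hj hv).symm) (fun k v hv => hv)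
      rw [List.drop_zero] at hmain
      rw [hmain.1]
      rw [pvD]
      simp
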